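-- pv_equiv track=rewrite | github.com/DDD-Enterprises/taskX | src/dopetask/project/doctor.py | _find_drift_files
-- ===== SOURCE A (Python) =====
-- def _find_drift_files(per_file_status: dict[str, dict[str, str]]) -> list[str]:
--     signatures: dict[str, tuple[str, str]] = {}
--     counts: dict[tuple[str, str], int] = {}
--
--     for filename, states in per_file_status.items():
--         signature = (states.get("taskx", "unknown"), states.get("chatx", "unknown"))
--         signatures[filename] = signature
--         counts[signature] = counts.get(signature, 0) + 1
--
--     if not counts:
--         return []
--
--     baseline = max(counts.items(), key=lambda item: item[1])[0]
--     drift = [filename for filename, signature in signatures.items() if signature != baseline]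
--     return sorted(drift)
-- ===== SOURCE B (Python) =====
-- def _find_drift_files(per_file_status: dict[str, dict[str, str]]) -> list[str]:
--     names = list(per_file_status)
--     sigs = [(st.get("taskx", "unknown"), st.get("chatx", "unknown"))
--             for st in per_file_status.values()]
--     baseline = None
--     for i, s in enumerate(sigs):
--         if s not in sigs[:i] and (baseline is None
--                                   or sigs.count(s) > sigs.count(baseline)):
--             baseline = s
--     if baseline is None:
--         return []
--     return sorted(n for n, s in zip(names, sigs) if s != baseline)
-- ===== Notes on version B (the rewrite author's own statement) =====
-- stated objective: alternative
-- what changed: A builds two hash maps (filename->signature and signature->count) and takes a max over the counts dict; B builds no mapping structure at all: it scans positions once, treats each first-occurring signature as a candidate and compares counts recomputed on demand by full-list scans (sigs.count), then filters a zip of names against the winning signature.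
import Mathlib
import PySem

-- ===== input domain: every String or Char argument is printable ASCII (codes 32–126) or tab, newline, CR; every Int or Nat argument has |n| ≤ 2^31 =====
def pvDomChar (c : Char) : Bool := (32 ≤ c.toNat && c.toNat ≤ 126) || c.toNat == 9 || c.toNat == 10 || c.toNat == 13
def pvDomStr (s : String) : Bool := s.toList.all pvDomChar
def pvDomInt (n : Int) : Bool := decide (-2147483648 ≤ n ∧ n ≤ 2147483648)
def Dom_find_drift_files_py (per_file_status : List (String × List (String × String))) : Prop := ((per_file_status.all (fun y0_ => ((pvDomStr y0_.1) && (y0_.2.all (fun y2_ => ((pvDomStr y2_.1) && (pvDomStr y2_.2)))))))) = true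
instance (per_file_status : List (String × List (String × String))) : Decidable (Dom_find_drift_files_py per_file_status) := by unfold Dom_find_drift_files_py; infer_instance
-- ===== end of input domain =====

-- B drops A's two hash maps (filename->signature, signature->count): it scans positions once,
-- takes each first-occurring signature as a candidate, compares counts recomputed by full-list
-- scans, and filters a zip of names; objective: alternative (no mapping structure; not faster).

-- signature = (states.get("taskx", "unknown"), states.get("chatx", "unknown")) — shared helper
def pvSig (st : List (String × String)) : String × String :=
  ((PySem.Dict.mk st).getD "taskx" "unknown", (PySem.Dict.mk st).getD "chatx" "unknown")

-- ===== PORT A =====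
def find_drift_files_py (per_file_status : List (String × List (String × String))) : List String :=
  let p := per_file_status.foldl
    (fun (p : PySem.Dict String (String × String) × PySem.Dict (String × String) Int) fs =>
      let s := pvSig fs.2
      (p.1.insert fs.1 s, p.2.insert s (p.2.getD s 0 + 1)))
    (PySem.Dict.empty, PySem.Dict.empty)
  match PySem.List.max? p.2.items (fun it => it.2) with
  | none => []
  | some bl =>
      PySem.List.sorted (((p.1.items).filter (fun fs => decide (fs.2 ≠ bl.1))).map (fun fs => fs.1))
        (fun x => x) false

-- ===== PORT B =====
def find_drift_files_py_alt (per_file_status : List (String × List (String × String))) : List String :=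
  let names := per_file_status.map (fun fs => fs.1)
  let sigs := per_file_status.map (fun fs => pvSig fs.2)
  let baseline := (PySem.List.enumerate sigs).foldl
    (fun (b : Option (String × String)) is =>
      if (!decide (is.2 ∈ PySem.List.slice sigs none (some is.1))) &&
         (match b with
          | none => true
          | some bs => decide (PySem.List.count sigs bs < PySem.List.count sigs is.2))
      then some is.2 else b) none
  match baseline with
  | none => []
  | some bl =>
      PySem.List.sorted
        (((names.zip sigs).filter (fun p => decide (p.2 ≠ bl))).map (fun p => p.1))
        (fun x => x) false

-- ===== PRECONDITION & SPEC =====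
-- The Python parameter is a dict keyed by filename; an association list with a duplicated
-- filename does not represent any Python dict input (A's dict would overwrite the entry while
-- the counts still see both), so Pre_ restricts the claim to faithful images of dicts.
def Pre_find_drift_files_py (per_file_status : List (String × List (String × String))) : Prop :=
  (per_file_status.map (fun fs => fs.1)).Nodup
instance (per_file_status : List (String × List (String × String))) : Decidable (Pre_find_drift_files_py per_file_status) := by unfold Pre_find_drift_files_py; infer_instance

def pvWitness_find_drift_files_py : (List (String × List (String × String))) :=
  [("a.py", [("taskx", "ok"), ("chatx", "ok")]), ("b.py", [("taskx", "bad")]),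
   ("c.py", [("taskx", "ok"), ("chatx", "ok")])]

def Spec_find_drift_files_py (per_file_status : List (String × List (String × String))) (out : List String) : Prop := out = find_drift_files_py_alt per_file_status
instance (per_file_status : List (String × List (String × String))) (out : List String) : Decidable (Spec_find_drift_files_py per_file_status out) := by unfold Spec_find_drift_files_py; infer_instance

-- ===== CLAIM (what is proved, stated in full; the proofs are below) =====
def Claim_equal_find_drift_files_py : Prop := ∀ (per_file_status : List (String × List (String × String))), Dom_find_drift_files_py per_file_status → Pre_find_drift_files_py per_file_status → Spec_find_drift_files_py per_file_status (find_drift_files_py per_file_status)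

-- ===== LEMMAS AND PROOFS =====

theorem pv_foldl_pair {α β γ : Type} (l : List γ) (f : α → γ → α) (g : β → γ → β) (a : α) (b : β) :
    l.foldl (fun p x => (f p.1 x, g p.2 x)) (a, b) = (l.foldl f a, l.foldl g b) := by
  induction l generalizing a b with
  | nil => rfl
  | cons x t ih => simpa using ih (f a x) (g b x)

theorem pv_max?_foldl_map {κ α : Type} (kf : α → Int) (f : κ → α) (K : List κ) (a : Option κ) :
    List.foldl (fun acc x => match acc with
        | none => some x
        | some m => if kf m < kf x then some x else some m) (a.map f) (K.map f)
    = (List.foldl (fun acc x => match acc with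
        | none => some x
        | some m => if kf (f m) < kf (f x) then some x else some m) a K).map f := by
  induction K generalizing a with
  | nil => rfl
  | cons k t ih =>
      simp only [List.map_cons, List.foldl_cons]
      rw [← ih]
      congr 1
      cases a with
      | none => rfl
      | some m => simp only [Option.map_some]; split <;> simp

theorem pv_max?_map {κ α : Type} (K : List κ) (f : κ → α) (kf : α → Int) :
    PySem.List.max? (K.map f) kf = (PySem.List.max? K (fun k => kf (f k))).map f := by
  unfold PySem.List.max?
  simpa using pv_max?_foldl_map kf f K none

-- first occurrences of `suf` that are new relative to the processed prefix `seen`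
def pvFN {α : Type} [DecidableEq α] (suf seen : List α) : List α :=
  match suf with
  | [] => []
  | s :: t => if s ∈ seen then pvFN t (seen ++ [s]) else s :: pvFN t (seen ++ [s])

theorem pvFN_congr {α : Type} [DecidableEq α] (suf : List α) :
    ∀ s1 s2 : List α, (∀ x, x ∈ s1 ↔ x ∈ s2) → pvFN suf s1 = pvFN suf s2 := by
  induction suf with
  | nil => intro _ _ _; rfl
  | cons s t ih =>
      intro s1 s2 h
      have h' : ∀ x, x ∈ s1 ++ [s] ↔ x ∈ s2 ++ [s] := by
        intro x; simp [h x]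
      by_cases hs : s ∈ s1
      · simp [pvFN, hs, (h s).mp hs, ih _ _ h']
      · have hs2 : s ∉ s2 := fun hh => hs ((h s).mpr hh)
        simp [pvFN, hs, hs2, ih _ _ h']

theorem pv_foldl_add_eq_pvFN {α : Type} [BEq α] [LawfulBEq α] [DecidableEq α] (suf : List α) :
    ∀ acc : List α, suf.foldl PySem.Set.add acc = acc ++ pvFN suf acc := by
  induction suf with
  | nil => intro acc; simp [pvFN]
  | cons s t ih =>
      intro acc
      by_cases hs : s ∈ acc
      · have hadd : PySem.Set.add acc s = acc := by
          simp [PySem.Set.add, PySem.Set.contains, hs]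
        rw [List.foldl_cons, hadd, ih acc]
        have : pvFN t acc = pvFN t (acc ++ [s]) :=
          pvFN_congr t acc (acc ++ [s]) (by intro x; by_cases hx : x = s <;> simp [hx, hs])
        simp [pvFN, hs, this]
      · have hadd : PySem.Set.add acc s = acc ++ [s] := by
          simp [PySem.Set.add, PySem.Set.contains, hs]
        rw [List.foldl_cons, hadd, ih (acc ++ [s])]
        simp [pvFN, hs]

theorem pv_ofList_eq_pvFN {α : Type} [BEq α] [LawfulBEq α] [DecidableEq α] (l : List α) :
    PySem.Set.ofList l = pvFN l [] := by
  rw [PySem.Set.ofList_eq_foldl]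
  simpa using pv_foldl_add_eq_pvFN l []

-- B's positional scan with the first-occurrence guard = the max?-style fold over the new elements
theorem pv_enum_fold_eq_pvFN (sigs : List (String × String)) :
    ∀ (suf pre : List (String × String)) (n : Int), pre ++ suf = sigs → n = (pre.length : Int) →
    ∀ b : Option (String × String),
    (PySem.List.enumerate suf n).foldl
      (fun (b : Option (String × String)) is =>
        if (!decide (is.2 ∈ PySem.List.slice sigs none (some is.1))) &&
           (match b with
            | none => true
            | some bs => decide (PySem.List.count sigs bs < PySem.List.count sigs is.2))
        then some is.2 else b) b
    = (pvFN suf pre).foldl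
      (fun acc x => match acc with
        | none => some x
        | some m => if PySem.List.count sigs m < PySem.List.count sigs x then some x else some m) b := by
  intro suf
  induction suf with
  | nil => intro pre n _ _ b; simp [PySem.List.enumerate, pvFN]
  | cons s t ih =>
      intro pre n hpre hn b
      rw [PySem.List.enumerate_cons, List.foldl_cons]
      have hslice : PySem.List.slice sigs none (some n) = pre := by
        rw [hn, PySem.List.slice_to_natCast, ← hpre, List.take_left]
      have ht : pre ++ [s] ++ t = sigs := by simpa using hpre
      have hn' : n + 1 = (((pre ++ [s]).length : Nat) : Int) := by simp [hn]
      have ihr := ih (pre ++ [s]) (n + 1) ht hn'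
      by_cases hs : s ∈ pre
      · have hstep : (if (!decide ((n, s).2 ∈ PySem.List.slice sigs none (some (n, s).1))) &&
            (match b with
             | none => true
             | some bs => decide (PySem.List.count sigs bs < PySem.List.count sigs (n, s).2))
            then some (n, s).2 else b) = b := by
          simp [hslice, hs]
        rw [hstep, ihr b]
        have hFN : pvFN (s :: t) pre = pvFN t (pre ++ [s]) := by simp [pvFN, hs]
        rw [hFN]
      · have hstep : (if (!decide ((n, s).2 ∈ PySem.List.slice sigs none (some (n, s).1))) &&
            (match b with
             | none => true
             | some bs => decide (PySem.List.count sigs bs < PySem.List.count sigs (n, s).2))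
            then some (n, s).2 else b)
            = (match b with
               | none => some s
               | some m => if PySem.List.count sigs m < PySem.List.count sigs s then some s else some m) := by
          cases b with
          | none => simp [hslice, hs]
          | some m =>
              by_cases hc : PySem.List.count sigs m < PySem.List.count sigs s
              · simp [hslice, hs]
              · simp [hslice, hs]
        rw [hstep, ihr]
        have hFN : pvFN (s :: t) pre = s :: pvFN t (pre ++ [s]) := by simp [pvFN, hs]
        rw [hFN, List.foldl_cons]

-- the Nat-count fold is max? with the Int-cast count key
theorem pv_fold_eq_max? (sigs D : List (String × String)) :
    D.foldl
      (fun acc x => match acc with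
        | none => some x
        | some m => if PySem.List.count sigs m < PySem.List.count sigs x then some x else some m)
      none
    = PySem.List.max? D (fun k => (List.count k sigs : Int)) := by
  unfold PySem.List.max?
  congr 1
  funext acc x
  cases acc with
  | none => rfl
  | some m =>
      dsimp only
      by_cases hc : PySem.List.count sigs m < PySem.List.count sigs x
      · rw [if_pos hc, if_pos (by exact_mod_cast (by simpa [PySem.List.count_eq] using hc))]
      · rw [if_neg hc, if_neg (fun h => hc (by simpa [PySem.List.count_eq] using (Int.ofNat_lt.mp (by exact_mod_cast h))))]

theorem find_drift_files_py_spec_aux (l : List (String × List (String × String)))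
    (h1 : (l.map (fun fs => fs.1)).Nodup) :
    find_drift_files_py l = find_drift_files_py_alt l := by
  have hpair :
      (l.foldl (fun (p : PySem.Dict String (String × String) × PySem.Dict (String × String) Int) fs =>
          (p.1.insert fs.1 (pvSig fs.2), p.2.insert (pvSig fs.2) (p.2.getD (pvSig fs.2) 0 + 1)))
        (PySem.Dict.empty, PySem.Dict.empty))
      = (l.foldl (fun d fs => d.insert fs.1 (pvSig fs.2)) PySem.Dict.empty,
         l.foldl (fun d fs => d.insert (pvSig fs.2) (d.getD (pvSig fs.2) 0 + 1)) PySem.Dict.empty) :=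
    pv_foldl_pair l (fun (d : PySem.Dict String (String × String)) fs => d.insert fs.1 (pvSig fs.2))
      (fun (d : PySem.Dict (String × String) Int) fs => d.insert (pvSig fs.2) (d.getD (pvSig fs.2) 0 + 1))
      PySem.Dict.empty PySem.Dict.empty
  have hC :
      List.foldl (fun (d : PySem.Dict (String × String) Int) fs =>
          d.insert (pvSig fs.2) (d.getD (pvSig fs.2) 0 + 1)) PySem.Dict.empty l
        = PySem.Dict.counter (l.map (fun fs => pvSig fs.2)) := by
    rw [← PySem.Dict.foldl_insert_getD_add_one_eq_counter, List.foldl_map]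
  have hS :
      (List.foldl (fun (d : PySem.Dict String (String × String)) fs =>
          d.insert fs.1 (pvSig fs.2)) PySem.Dict.empty l).items
        = l.map (fun fs => (fs.1, pvSig fs.2)) := by
    have h := PySem.Dict.items_foldl_insert_fresh l (fun fs => fs.1) (fun fs => pvSig fs.2)
      PySem.Dict.empty (fun a _ => rfl) h1
    simpa using h
  -- unfold both ports
  unfold find_drift_files_py find_drift_files_py_alt
  simp only [hpair, hC, hS, PySem.Dict.items_counter]
  rw [pv_max?_map (PySem.Set.ofList (l.map (fun fs => pvSig fs.2)))
      (fun k => (k, (List.count k (l.map (fun fs => pvSig fs.2)) : Int))) (fun it => it.2)]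
  have h3 := pv_enum_fold_eq_pvFN (l.map (fun fs => pvSig fs.2)) (l.map (fun fs => pvSig fs.2)) [] 0
    rfl (by simp)
  rw [h3 none]
  dsimp only
  rw [← pv_ofList_eq_pvFN, pv_fold_eq_max?]
  have hzip : (l.map (fun fs => fs.1)).zip (l.map (fun fs => pvSig fs.2))
      = l.map (fun fs => (fs.1, pvSig fs.2)) := by rw [List.zip_map']
  rw [hzip]
  cases hm : PySem.List.max? (PySem.Set.ofList (l.map (fun fs => pvSig fs.2)))
      (fun k => (List.count k (l.map (fun fs => pvSig fs.2)) : Int)) with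
  | none => simp
  | some bk => simp

-- ===== VERDICT (by name: the statement is the Claim_ definition above) =====
theorem find_drift_files_py_spec : Claim_equal_find_drift_files_py := by
  intro l _ hpre
  unfold Spec_find_drift_files_py
  exact find_drift_files_py_spec_aux l hpre
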